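-- pv_equiv track=rewrite | github.com/Ire57/Tadpole | conservacion.py | conservation_category
-- ===== SOURCE A (Python) =====
-- from collections import Counter
--
-- def conservation_category(msa, idx):
--     """
--     Categorizes the conservation level of a specific column in an MSA.
--
--     This function determines a qualitative category for the conservation of a column
--     based on the frequency of its most common character, excluding gaps.
--     It defines categories such as "always conserved",
--     "always_conserved_except_two" (always conserved minus up to 2 differences), etc.
--
--     :param msa: A list of strings representing the Multiple Sequence Alignment (list of str).
--     :param idx: The 0-indexed position of the column to categorize (int).
--
--     :returns: A string indicating the conservation category:
--               - "always_conserved": If all non-gap characters in the column are identical.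
--               - "always_conserved_except_two": If there are 1 or 2 differences from the most common character.
--               - "always_conserved_except_4": If there are 3 or 4 differences from the most common character.
--               - "others": For all other cases (more than 4 differences).
--               (str)
--     """
--     # Filter out gaps ('-') from the column before calculating conservation
--     column = [seq[idx] for seq in msa if seq[idx] != '-']
--
--     if not column: # Handle case of column with only gaps
--         return "others" # Or a specific category for all-gap columns if needed
--
--     most_common_char, _ = Counter(column).most_common(1)[0] # Get the most common character and its count
--
--     # Calculate the number of characters that are NOT the most common
--     diff = len(column) - column.count(most_common_char)
--
--     if diff == 0:
--         return "always_conserved"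
--     elif diff <= 2:
--         return "always_conserved_except_two"
--     elif diff <= 4:
--         return "always_conserved_except_4"
--     else:
--         return "others"
-- ===== SOURCE B (Python) =====
-- def conservation_category(msa, idx):
--     # Sort the non-gap column and find the mode frequency as the longest run
--     # of equal consecutive characters (single linear scan, no counting table).
--     column = [seq[idx] for seq in msa if seq[idx] != '-']
--     if not column:
--         return "others"
--     ys = sorted(column)
--     best = cur = 1
--     for prev, c in zip(ys, ys[1:]):
--         cur = cur + 1 if c == prev else 1
--         if cur > best:
--             best = cur
--     diff = len(column) - best
--     if diff == 0:
--         return "always_conserved"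
--     if diff <= 2:
--         return "always_conserved_except_two"
--     if diff <= 4:
--         return "always_conserved_except_4"
--     return "others"
-- ===== Notes on version B (the rewrite author's own statement) =====
-- stated objective: alternative
-- what changed: B finds the mode frequency by sorting the column and scanning it once for the longest run of equal consecutive characters, instead of building a Counter table and selecting most_common; the same gap filter, all-gap guard and thresholds are applied.
import Mathlib
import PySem

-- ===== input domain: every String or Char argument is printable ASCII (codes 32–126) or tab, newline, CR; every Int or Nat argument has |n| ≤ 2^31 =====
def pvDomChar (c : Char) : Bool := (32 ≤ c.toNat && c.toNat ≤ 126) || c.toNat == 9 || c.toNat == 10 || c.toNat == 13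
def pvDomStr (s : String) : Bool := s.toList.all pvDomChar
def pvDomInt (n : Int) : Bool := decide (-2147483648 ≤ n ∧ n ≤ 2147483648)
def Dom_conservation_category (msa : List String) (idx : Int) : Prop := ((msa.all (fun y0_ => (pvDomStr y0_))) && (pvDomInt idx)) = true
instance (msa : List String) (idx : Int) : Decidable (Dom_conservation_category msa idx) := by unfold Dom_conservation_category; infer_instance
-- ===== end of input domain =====

-- B finds the mode frequency by sorting the non-gap column and scanning once for the
-- longest run of equal consecutive characters, instead of A's Counter/most_common table;
-- return values agree everywhere A returns.

-- ===== PORT A =====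
-- column = [seq[idx] for seq in msa if seq[idx] != '-']  (total via .getD under Pre_)
def pvColumn (msa : List String) (idx : Int) : List Char :=
  (msa.map (fun seq => (PySem.Str.pyGet? seq idx).getD ' ')).filter (fun c => c != '-')

def conservation_category (msa : List String) (idx : Int) : String :=
  let column := pvColumn msa idx
  if column.isEmpty then "others"
  else
    -- Counter(column).most_common(1)[0]: items sorted by count, descending, stable
    let mc := (PySem.List.sorted (PySem.Dict.counter column).items (fun p => p.2) true).headD (' ', 0)
    let diff : Int := (column.length : Int) - (PySem.List.count column mc.1 : Int)
    if diff = 0 then "always_conserved"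
    else if diff ≤ 2 then "always_conserved_except_two"
    else if diff ≤ 4 then "always_conserved_except_4"
    else "others"

-- ===== PORT B =====
-- the 'for prev, c in zip(ys, ys[1:])' loop: carries prev, cur, best down the tail
def pvRunScan (prev : Char) (cur best : Int) : List Char → Int
  | [] => best
  | c :: rest =>
      let cur' := if c == prev then cur + 1 else 1
      pvRunScan c cur' (if cur' > best then cur' else best) rest

def conservation_category_alt (msa : List String) (idx : Int) : String :=
  let column := (msa.map (fun seq => (PySem.Str.pyGet? seq idx).getD ' ')).filter (fun c => c != '-')
  if column.isEmpty then "others"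
  else
    let ys := PySem.List.sorted column (fun c => c) false
    let best := match ys with
      | [] => (1 : Int)            -- zip(ys, ys[1:]) is empty: best stays 1
      | y :: t => pvRunScan y 1 1 t
    let diff : Int := (column.length : Int) - best
    if diff = 0 then "always_conserved"
    else if diff ≤ 2 then "always_conserved_except_two"
    else if diff ≤ 4 then "always_conserved_except_4"
    else "others"

-- ===== PRECONDITION & SPEC =====
-- Pre_ excludes exactly the inputs where some seq[idx] raises IndexError in A's comprehension.
def Pre_conservation_category (msa : List String) (idx : Int) : Prop :=
  ∀ s ∈ msa, PySem.Raise.InRange s.toList.length idx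
instance (msa : List String) (idx : Int) : Decidable (Pre_conservation_category msa idx) := by unfold Pre_conservation_category; infer_instance

def pvWitness_conservation_category : List String × Int := (["AB", "AB", "CB"], 1)

def Spec_conservation_category (msa : List String) (idx : Int) (out : String) : Prop := out = conservation_category_alt msa idx
instance (msa : List String) (idx : Int) (out : String) : Decidable (Spec_conservation_category msa idx out) := by unfold Spec_conservation_category; infer_instance

-- ===== CLAIM (what is proved, stated in full; the proofs are below) =====
def Claim_equal_conservation_category : Prop := ∀ (msa : List String) (idx : Int), Dom_conservation_category msa idx → Pre_conservation_category msa idx → Spec_conservation_category msa idx (conservation_category msa idx)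

-- ===== LEMMAS AND PROOFS =====

-- the maximum multiplicity of any character in l (proof-side notion both ports are related to)
def MaxCount (l : List Char) : Nat := (l.map (fun c => l.count c)).foldr max 0

theorem pv_le_foldr_max (ns : List Nat) : ∀ n ∈ ns, n ≤ ns.foldr max 0 := by
  induction ns with
  | nil => intro n h; cases h
  | cons x t ih =>
      intro n h
      rcases List.mem_cons.mp h with h | h
      · subst h; exact le_max_left _ _
      · exact le_trans (ih n h) (le_max_right _ _)

theorem pv_foldr_max_attained (ns : List Nat) : ns.foldr max 0 ∈ ns ∨ ns.foldr max 0 = 0 := by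
  induction ns with
  | nil => exact Or.inr rfl
  | cons x t ih =>
      by_cases h : t.foldr max 0 ≤ x
      · left; simp [List.foldr, max_eq_left h]
      · rcases ih with hm | h0
        · left; simp [List.foldr, max_eq_right (le_of_not_ge h)]; right; exact hm
        · omega

theorem pv_count_le_MaxCount (l : List Char) : ∀ c ∈ l, l.count c ≤ MaxCount l := by
  intro c hc
  exact pv_le_foldr_max _ _ (List.mem_map.mpr ⟨c, hc, rfl⟩)

theorem pv_MaxCount_exists (l : List Char) (h : l ≠ []) : ∃ c ∈ l, MaxCount l = l.count c := by
  rcases pv_foldr_max_attained (l.map (fun c => l.count c)) with hm | h0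
  · obtain ⟨c, hc, hcc⟩ := List.mem_map.mp hm
    exact ⟨c, hc, hcc.symm⟩
  · obtain ⟨x, t⟩ := List.exists_cons_of_ne_nil h
    obtain ⟨t, rfl⟩ := t
    have h1 : (x :: t).count x ≤ MaxCount (x :: t) := pv_count_le_MaxCount _ x List.mem_cons_self
    have h2 : (1 : Nat) ≤ (x :: t).count x := by simp
    have h3 : MaxCount (x :: t) = 0 := h0
    omega

theorem pv_MaxCount_append_singleton (P : List Char) (c : Char) :
    MaxCount (P ++ [c]) = max (MaxCount P) (P.count c + 1) := by
  have hcount : ∀ x : Char, (P ++ [c]).count x = P.count x + if c == x then 1 else 0 := by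
    intro x; simp [List.count_append, List.count_singleton]
  apply le_antisymm
  · obtain ⟨x, hx, hxc⟩ := pv_MaxCount_exists (P ++ [c]) (by simp)
    rw [hxc, hcount x]
    by_cases hxc' : c = x
    · subst hxc'
      simp only [beq_self_eq_true, if_pos]
      exact le_max_of_le_right (by omega)
    · simp only [beq_iff_eq, if_neg hxc', Nat.add_zero]
      rcases List.mem_append.mp hx with h | h
      · exact le_max_of_le_left (pv_count_le_MaxCount P x h)
      · simp at h; exact absurd h.symm hxc'
  · apply max_le
    · by_cases hP : P = []
      · subst hP; simp [MaxCount]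
      · obtain ⟨x, hx, hxc⟩ := pv_MaxCount_exists P hP
        rw [hxc]
        calc P.count x ≤ (P ++ [c]).count x := by rw [hcount x]; omega
          _ ≤ MaxCount (P ++ [c]) := pv_count_le_MaxCount _ x (List.mem_append.mpr (Or.inl hx))
    · have : (P ++ [c]).count c = P.count c + 1 := by rw [hcount c]; simp
      rw [← this]
      exact pv_count_le_MaxCount _ c (List.mem_append.mpr (Or.inr (by simp)))

-- the loop invariant: after processing pre ++ [prev] of a sorted list, cur is the
-- multiplicity of prev so far and best is the maximum multiplicity so far
theorem pv_runScan_eq (l : List Char) : ∀ (pre : List Char) (prev : Char),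
    (pre ++ prev :: l).Pairwise (fun a b => a ≤ b) →
    pvRunScan prev ((pre ++ [prev]).count prev : Int) ((MaxCount (pre ++ [prev]) : Nat) : Int) l
      = (MaxCount (pre ++ prev :: l) : Int) := by
  induction l with
  | nil => intro pre prev _; rfl
  | cons c t ih =>
      intro pre prev hs
      have hassoc : pre ++ [prev] ++ c :: t = pre ++ prev :: c :: t := by simp
      have hs' : (pre ++ [prev] ++ c :: t).Pairwise (fun a b => a ≤ b) := by rw [hassoc]; exact hs
      have hIH := ih (pre ++ [prev]) c hs'
      have hcount_c : ((pre ++ [prev] ++ [c]).count c : Int)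
          = if c == prev then ((pre ++ [prev]).count prev : Int) + 1 else 1 := by
        by_cases hcp : c = prev
        · subst hcp
          simp only [beq_self_eq_true, if_true]
          have h3 : (pre ++ [c] ++ [c]).count c = (pre ++ [c]).count c + 1 := by
            rw [List.count_append]; simp
          rw [h3]
          push_cast
          ring
        · simp only [beq_iff_eq, if_neg hcp]
          have hnotin : c ∉ pre ++ [prev] := by
            intro hmem
            rcases List.mem_append.mp hmem with hmm | hmm
            · have hle1 : c ≤ prev := (List.pairwise_append.mp hs).2.2 c hmm prev (by simp)
              have hle2 : prev ≤ c :=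
                (List.pairwise_cons.mp (List.pairwise_append.mp hs).2.1).1 c (by simp)
              exact hcp (le_antisymm hle1 hle2)
            · simp at hmm; exact hcp hmm
          have hpre : pre.count c = 0 :=
            List.count_eq_zero.mpr (fun hm => hnotin (List.mem_append.mpr (Or.inl hm)))
          have h3 : (pre ++ [prev] ++ [c]).count c = pre.count c + [prev].count c + [c].count c := by
            rw [List.count_append, List.count_append]
          have hpc : ¬ prev = c := fun e => hcp e.symm
          have h4 : [prev].count c = 0 := by simp [hpc]
          have h5 : [c].count c = 1 := by simp
          rw [h3, hpre, h4, h5]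
          rfl
      have hbest : ((MaxCount (pre ++ [prev] ++ [c]) : Nat) : Int)
          = max ((MaxCount (pre ++ [prev]) : Nat) : Int) ((pre ++ [prev] ++ [c]).count c : Int) := by
        rw [pv_MaxCount_append_singleton]
        have hc1 : ((pre ++ [prev] ++ [c]).count c : Int) = ((pre ++ [prev]).count c + 1 : Nat) := by
          have hstep : (pre ++ [prev] ++ [c]).count c = (pre ++ [prev]).count c + 1 := by
            rw [List.count_append]; simp
          rw [hstep]
        rw [hc1]
        push_cast [Nat.cast_max]
        rfl
      show pvRunScan c _ _ t = _
      rw [← hassoc]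
      rw [← hIH]
      congr 1
      · exact hcount_c.symm
      · rw [hbest, ← hcount_c]
        by_cases h : ((MaxCount (pre ++ [prev]) : Nat) : Int) < ((pre ++ [prev] ++ [c]).count c : Int)
        · rw [if_pos h, max_eq_right (le_of_lt h)]
        · rw [if_neg h, max_eq_left (not_lt.mp h)]

-- A's count of the most common character equals the maximum of the per-character counts.
theorem pv_mode_count_eq (column : List Char) (h : column ≠ []) :
    (PySem.List.count column ((PySem.List.sorted (PySem.Dict.counter column).items (fun p => p.2) true).headD (' ', 0)).1 : Int)
      = (PySem.List.max? (column.map (fun c => (PySem.List.count column c : Int))) (fun x => x)).getD 0 := by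
  have hitems := PySem.Dict.items_counter (xs := column)
  have hne : PySem.List.sorted (PySem.Dict.counter column).items (fun p => p.2) true ≠ [] := by
    intro hnil
    rw [PySem.List.sorted_eq_nil_iff, hitems, List.map_eq_nil_iff] at hnil
    obtain ⟨x, hx⟩ := List.exists_mem_of_ne_nil column h
    exact absurd ((PySem.Set.mem_ofList _ _).mpr hx) (by simp [hnil])
  obtain ⟨m, t, hmt⟩ := List.exists_cons_of_ne_nil hne
  have hhead : (PySem.List.sorted (PySem.Dict.counter column).items (fun p => p.2) true).headD (' ', 0) = m := by
    rw [hmt]; rfl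
  have hmem : m ∈ (PySem.Dict.counter column).items := by
    have : m ∈ PySem.List.sorted (PySem.Dict.counter column).items (fun p => p.2) true := by
      rw [hmt]; exact List.mem_cons_self
    exact (PySem.List.mem_sorted _ _ _ _).mp this
  rw [hitems] at hmem
  obtain ⟨k, hk, hkm⟩ := List.mem_map.mp hmem
  have hkcol : k ∈ column := (PySem.Set.mem_ofList _ _).mp hk
  have hmax := PySem.List.key_head_sorted_rev_ge _ _ hmt
  have hcnts : column.map (fun c => (PySem.List.count column c : Int)) ≠ [] := by
    simpa [List.map_eq_nil_iff] using h
  obtain ⟨M, hM⟩ : ∃ M, PySem.List.max? (column.map (fun c => (PySem.List.count column c : Int))) (fun x => x) = some M := by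
    cases hopt : PySem.List.max? (column.map (fun c => (PySem.List.count column c : Int))) (fun x => x) with
    | none => exact absurd ((PySem.List.max?_eq_none_iff _ _).mp hopt) hcnts
    | some M => exact ⟨M, rfl⟩
  rw [hhead, hM, Option.getD_some]
  have hMmem : M ∈ column.map (fun c => (PySem.List.count column c : Int)) := PySem.List.max?_mem hM
  have hMmax : ∀ y ∈ column.map (fun c => (PySem.List.count column c : Int)), y ≤ M := by
    intro y hy; exact PySem.List.max?_isMax hM y hy
  apply le_antisymm
  · exact hMmax _ (List.mem_map.mpr ⟨m.1, by rw [← hkm]; exact ⟨hkcol, rfl⟩⟩)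
  · obtain ⟨c, hc, hcM⟩ := List.mem_map.mp hMmem
    have : ((c, (PySem.List.count column c : Int)) : Char × Int) ∈ (PySem.Dict.counter column).items := by
      rw [hitems]; exact List.mem_map.mpr ⟨c, (PySem.Set.mem_ofList _ _).mpr hc, rfl⟩
    have h2 := hmax _ this
    rw [← hkm] at h2 ⊢
    simpa [← hcM] using h2

-- the per-character max? equals MaxCount
theorem pv_pymax_eq_MaxCount (l : List Char) (h : l ≠ []) :
    (PySem.List.max? (l.map (fun c => (PySem.List.count l c : Int))) (fun x => x)).getD 0
      = ((MaxCount l : Nat) : Int) := by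
  have hcnts : l.map (fun c => (PySem.List.count l c : Int)) ≠ [] := by
    simpa [List.map_eq_nil_iff] using h
  obtain ⟨M, hM⟩ : ∃ M, PySem.List.max? (l.map (fun c => (PySem.List.count l c : Int))) (fun x => x) = some M := by
    cases hopt : PySem.List.max? (l.map (fun c => (PySem.List.count l c : Int))) (fun x => x) with
    | none => exact absurd ((PySem.List.max?_eq_none_iff _ _).mp hopt) hcnts
    | some M => exact ⟨M, rfl⟩
  rw [hM, Option.getD_some]
  apply le_antisymm
  · obtain ⟨c, hc, hcM⟩ := List.mem_map.mp (PySem.List.max?_mem hM)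
    rw [← hcM, PySem.List.count_eq]
    exact_mod_cast pv_count_le_MaxCount l c hc
  · obtain ⟨c, hc, hcM⟩ := pv_MaxCount_exists l h
    have : (PySem.List.count l c : Int) ≤ M :=
      PySem.List.max?_isMax hM _ (List.mem_map.mpr ⟨c, hc, rfl⟩)
    rw [hcM]
    rw [PySem.List.count_eq] at this
    exact_mod_cast this

-- MaxCount is invariant under permutation
theorem pv_MaxCount_perm (p q : List Char) (h : p.Perm q) : MaxCount p = MaxCount q := by
  rcases eq_or_ne p [] with rfl | hp
  · rw [h.symm.eq_nil]
  · have hq : q ≠ [] := by intro hq; subst hq; exact hp h.eq_nil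
    apply le_antisymm
    · obtain ⟨c, hc, hcc⟩ := pv_MaxCount_exists p hp
      rw [hcc, h.count_eq]
      exact pv_count_le_MaxCount q c (h.mem_iff.mp hc)
    · obtain ⟨c, hc, hcc⟩ := pv_MaxCount_exists q hq
      rw [hcc, ← h.count_eq]
      exact pv_count_le_MaxCount p c (h.symm.mem_iff.mp hc)

-- B's run-scan over the sorted column computes MaxCount of the column
theorem pv_best_eq_MaxCount (column : List Char) (h : column ≠ []) :
    (match PySem.List.sorted column (fun c => c) false with
      | [] => (1 : Int)
      | y :: t => pvRunScan y 1 1 t)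
      = ((MaxCount column : Nat) : Int) := by
  have hne : PySem.List.sorted column (fun c => c) false ≠ [] := by
    rw [Ne, PySem.List.sorted_eq_nil_iff]; exact h
  obtain ⟨y, t, hyt⟩ := List.exists_cons_of_ne_nil hne
  rw [hyt]
  have hpw : (([] : List Char) ++ y :: t).Pairwise (fun a b => a ≤ b) := by
    have := PySem.List.sorted_pairwise column (fun c => c)
    rw [hyt] at this
    simpa using this
  have h1 : (([] : List Char) ++ [y]).count y = 1 := by simp
  have h2 : MaxCount ([] ++ [y]) = 1 := by simp [MaxCount]
  have hrs := pv_runScan_eq t [] y hpw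
  rw [h1, h2] at hrs
  simp only [List.nil_append, Nat.cast_one] at hrs
  show pvRunScan y 1 1 t = _
  rw [hrs]
  have hperm : (y :: t).Perm column := by
    rw [← hyt]; exact PySem.List.sorted_perm column (fun c => c) false
  rw [pv_MaxCount_perm _ _ hperm]

theorem pv_body_eq (column : List Char) :
    (if column.isEmpty then "others"
     else
       let mc := (PySem.List.sorted (PySem.Dict.counter column).items (fun p => p.2) true).headD (' ', 0)
       let diff : Int := (column.length : Int) - (PySem.List.count column mc.1 : Int)
       if diff = 0 then "always_conserved"
       else if diff ≤ 2 then "always_conserved_except_two"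
       else if diff ≤ 4 then "always_conserved_except_4"
       else "others")
    = (if column.isEmpty then "others"
       else
         let ys := PySem.List.sorted column (fun c => c) false
         let best := match ys with
           | [] => (1 : Int)
           | y :: t => pvRunScan y 1 1 t
         let diff : Int := (column.length : Int) - best
         if diff = 0 then "always_conserved"
         else if diff ≤ 2 then "always_conserved_except_two"
         else if diff ≤ 4 then "always_conserved_except_4"
         else "others") := by
  by_cases hc : column.isEmpty
  · rw [if_pos hc, if_pos hc]
  · have hne : column ≠ [] := by simpa [List.isEmpty_iff] using hc
    rw [if_neg hc, if_neg hc]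
    have hA := pv_mode_count_eq column hne
    have hmid := pv_pymax_eq_MaxCount column hne
    have hB := pv_best_eq_MaxCount column hne
    show (if ((column.length : Int) - (PySem.List.count column ((PySem.List.sorted (PySem.Dict.counter column).items (fun p => p.2) true).headD (' ', 0)).1 : Int)) = 0 then _ else _) = _
    rw [hA, hmid, ← hB]

-- ===== VERDICT (by name: the statement is the Claim_ definition above) =====
theorem conservation_category_spec : Claim_equal_conservation_category := by
  intro msa idx _ _
  exact pv_body_eq (pvColumn msa idx)
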